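-- pv_equiv track=rewrite | github.com/x64BitWorm/Kefirchik | Backend/calculations.py | get_operation_priorities
-- ===== SOURCE A (Python) =====
-- opening_brackets = "([{<"
--
-- closing_brackets = ")]}>"
--
-- operation_priorities = {"-" : 1, "+": 1, "*": 2, "/": 3}
--
-- def get_operation_priorities(expr: str):
--   bracket_depth = 0
--   bracket_priority = 9
--   res = {}
--
--   for idx, c in enumerate(expr):
--     if c in opening_brackets:
--       bracket_depth += 1
--     elif c in closing_brackets:
--       bracket_depth -= 1
--     elif c in operation_priorities.keys():
--       res[idx] = operation_priorities[c] + bracket_depth * bracket_priority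
--
--   return res
-- ===== SOURCE B (Python) =====
-- opening_brackets = "([{<"
--
-- closing_brackets = ")]}>"
--
-- operation_priorities = {"-": 1, "+": 1, "*": 2, "/": 3}
--
-- def get_operation_priorities(expr: str):
--   # precompute cumulative bracket depth at each position, then filter operators
--   deltas = [1 if c in opening_brackets else -1 if c in closing_brackets else 0
--             for c in expr]
--   depths = []
--   d = 0
--   for x in deltas:
--     d += x
--     depths.append(d)
--   return {i: operation_priorities[c] + dep * 9
--           for i, (c, dep) in enumerate(zip(expr, depths))
--           if c in operation_priorities}
-- ===== Notes on version B (the rewrite author's own statement) =====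
-- stated objective: alternative
-- what changed: Replaces the single stateful depth-accumulator loop with a precomputed prefix-depth table (delta list + running sum) followed by a separate filtering pass over zip(expr, depths) that emits an entry per operator character.
import Mathlib
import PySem

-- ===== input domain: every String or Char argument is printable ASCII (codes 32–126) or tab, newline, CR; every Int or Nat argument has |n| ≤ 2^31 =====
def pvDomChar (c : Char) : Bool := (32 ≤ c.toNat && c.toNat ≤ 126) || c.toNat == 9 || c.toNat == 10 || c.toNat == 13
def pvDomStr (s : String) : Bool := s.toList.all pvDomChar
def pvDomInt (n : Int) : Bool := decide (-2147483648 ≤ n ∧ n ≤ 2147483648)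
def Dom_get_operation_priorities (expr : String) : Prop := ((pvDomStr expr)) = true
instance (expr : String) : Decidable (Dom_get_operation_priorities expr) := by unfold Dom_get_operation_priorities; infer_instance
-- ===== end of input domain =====

-- B replaces A's single stateful depth-accumulator loop with a precomputed prefix-depth
-- table plus a separate filtering pass (alternative decomposition; same O(n) cost).

-- ===== PORT A =====
def opening_brackets : List Char := "([{<".toList
def closing_brackets : List Char := ")]}>".toList
def operation_priorities : PySem.Dict Char Int :=
  PySem.Dict.ofList [('-', 1), ('+', 1), ('*', 2), ('/', 3)]

def get_operation_priorities (expr : String) : List (Int × Int) :=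
  ((PySem.List.enumerate expr.toList 0).foldl
    (fun (st : Int × PySem.Dict Int Int) p =>
      if p.2 ∈ opening_brackets then (st.1 + 1, st.2)
      else if p.2 ∈ closing_brackets then (st.1 - 1, st.2)
      else if operation_priorities.contains p.2 then
        (st.1, st.2.insert p.1 (operation_priorities.getD p.2 0 + st.1 * 9))
      else st)
    (0, PySem.Dict.empty)).2.items

-- ===== PORT B =====
def pvDelta (c : Char) : Int :=
  if c ∈ opening_brackets then 1 else if c ∈ closing_brackets then -1 else 0

-- dict comprehension over strictly increasing keys: its items are the filterMap list
def get_operation_priorities_alt (expr : String) : List (Int × Int) :=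
  let deltas := expr.toList.map pvDelta
  let depths := (deltas.foldl (fun (st : Int × List Int) x => (st.1 + x, st.2 ++ [st.1 + x]))
                  (0, ([] : List Int))).2
  (PySem.List.enumerate (expr.toList.zip depths) 0).filterMap
    (fun p => match operation_priorities.get? p.2.1 with
      | some v => some (p.1, v + p.2.2 * 9)
      | none => none)

-- ===== PRECONDITION & SPEC =====
def Spec_get_operation_priorities (expr : String) (out : List (Int × Int)) : Prop := out = get_operation_priorities_alt expr
instance (expr : String) (out : List (Int × Int)) : Decidable (Spec_get_operation_priorities expr out) := by unfold Spec_get_operation_priorities; infer_instance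

-- ===== CLAIM (what is proved, stated in full; the proofs are below) =====
def Claim_equal_get_operation_priorities : Prop := ∀ (expr : String), Dom_get_operation_priorities expr → Spec_get_operation_priorities expr (get_operation_priorities expr)

-- ===== LEMMAS AND PROOFS =====

-- common characterisation: result of scanning cs from index s at depth d
def pvSpec : List Char → Int → Int → List (Int × Int)
  | [], _, _ => []
  | c :: cs, s, d =>
    if c ∈ opening_brackets then pvSpec cs (s + 1) (d + 1)
    else if c ∈ closing_brackets then pvSpec cs (s + 1) (d - 1)
    else match operation_priorities.get? c with
      | some v => (s, v + d * 9) :: pvSpec cs (s + 1) d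
      | none => pvSpec cs (s + 1) d

lemma pvOp_not_bracket {c : Char} {v : Int} (h : operation_priorities.get? c = some v) :
    c ∉ opening_brackets ∧ c ∉ closing_brackets := by
  constructor <;> intro hm <;>
    simp [opening_brackets, closing_brackets] at hm <;>
    rcases hm with rfl | rfl | rfl | rfl <;>
    · have h' := congrArg Option.isSome h
      simp only [Option.isSome_some] at h'
      exact absurd h' (by decide)

lemma pvLemA (cs : List Char) : ∀ (s d : Int) (res : PySem.Dict Int Int),
    (∀ k ∈ res.keys, k < s) → res.keys.Nodup →
    ((PySem.List.enumerate cs s).foldl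
      (fun (st : Int × PySem.Dict Int Int) p =>
        if p.2 ∈ opening_brackets then (st.1 + 1, st.2)
        else if p.2 ∈ closing_brackets then (st.1 - 1, st.2)
        else if operation_priorities.contains p.2 then
          (st.1, st.2.insert p.1 (operation_priorities.getD p.2 0 + st.1 * 9))
        else st)
      (d, res)).2.items = res.items ++ pvSpec cs s d := by
  induction cs with
  | nil => intro s d res _ _; simp [PySem.List.enumerate, pvSpec]
  | cons c cs ih =>
    intro s d res hlt hnd
    rw [PySem.List.enumerate_cons]
    simp only [List.foldl_cons]
    by_cases h1 : c ∈ opening_brackets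
    · simp only [h1, if_pos]
      rw [pvSpec]; simp only [h1, if_pos]
      exact ih (s + 1) (d + 1) res (fun k hk => by have := hlt k hk; omega) hnd
    · by_cases h2 : c ∈ closing_brackets
      · simp only [h1, h2, if_neg, if_pos, ite_false, ite_true]
        rw [pvSpec]; simp only [h1, h2, if_neg, if_pos, ite_false, ite_true]
        exact ih (s + 1) (d - 1) res (fun k hk => by have := hlt k hk; omega) hnd
      · by_cases h3 : operation_priorities.contains c
        · simp only [h1, h2, h3, ite_false, ite_true]
          have hget : operation_priorities.get? c = some (operation_priorities.getD c 0) := by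
            have h3' : (operation_priorities.get? c).isSome = true := by
              rw [← PySem.Dict.contains_eq_isSome_get?]; exact h3
            cases hg : operation_priorities.get? c with
            | none => rw [hg] at h3'; simp at h3'
            | some v => rw [PySem.Dict.getD_eq_get?_getD, hg]; rfl
          rw [pvSpec]; simp only [h1, h2, ite_false, hget]
          have hcont : res.contains s = false := by
            rw [PySem.Dict.contains_eq_decide_mem_keys]
            simp only [decide_eq_false_iff_not]
            intro hmem; have := hlt s hmem; omega
          rw [ih (s + 1) d _
              (fun k hk => by
                rw [PySem.Dict.keys_insert_of_not_contains _ _ hcont] at hk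
                rcases List.mem_append.mp hk with h | h
                · have := hlt k h; omega
                · simp at h; omega)
              (by
                rw [PySem.Dict.keys_insert_of_not_contains _ _ hcont]
                refine List.Nodup.append hnd (List.nodup_singleton s) ?_
                intro k hk hk'; simp at hk'; subst hk'
                have := hlt k hk; omega)]
          rw [PySem.Dict.items_insert_of_not_contains _ _ hcont]
          simp
        · simp only [h1, h2, h3, ite_false]
          rw [pvSpec]
          have hget : operation_priorities.get? c = none := by
            cases hg : operation_priorities.get? c with
            | none => rfl
            | some v =>
              exact absurd (by rw [PySem.Dict.contains_eq_isSome_get?, hg]; rfl) h3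
          simp only [h1, h2, ite_false, hget]
          exact ih (s + 1) d res (fun k hk => by have := hlt k hk; omega) hnd

-- the prefix-depth list of B, in structural form
def pvDepths : Int → List Int → List Int
  | _, [] => []
  | d, x :: xs => (d + x) :: pvDepths (d + x) xs

lemma pvDepths_foldl (xs : List Int) : ∀ (d : Int) (acc : List Int),
    (xs.foldl (fun (st : Int × List Int) x => (st.1 + x, st.2 ++ [st.1 + x])) (d, acc)).2
      = acc ++ pvDepths d xs := by
  induction xs with
  | nil => intro d acc; simp [pvDepths]
  | cons x xs ih =>
    intro d acc
    simp only [List.foldl_cons, pvDepths]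
    rw [ih (d + x) (acc ++ [d + x])]
    simp

lemma pvLemB (cs : List Char) : ∀ (s d : Int),
    (PySem.List.enumerate (cs.zip (pvDepths d (cs.map pvDelta))) s).filterMap
      (fun p => match operation_priorities.get? p.2.1 with
        | some v => some (p.1, v + p.2.2 * 9)
        | none => none) = pvSpec cs s d := by
  induction cs with
  | nil => intro s d; simp [pvSpec, PySem.List.enumerate]
  | cons c cs ih =>
    intro s d
    simp only [List.map_cons, pvDepths, List.zip_cons_cons]
    rw [PySem.List.enumerate_cons]
    rw [List.filterMap_cons]
    rw [pvSpec]
    by_cases h1 : c ∈ opening_brackets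
    · have hget : operation_priorities.get? c = none := by
        cases hg : operation_priorities.get? c with
        | none => rfl
        | some v => exact absurd h1 (pvOp_not_bracket hg).1
      simp only [h1, if_pos, hget, pvDelta, ite_true]
      exact ih (s + 1) (d + 1)
    · by_cases h2 : c ∈ closing_brackets
      · have hget : operation_priorities.get? c = none := by
          cases hg : operation_priorities.get? c with
          | none => rfl
          | some v => exact absurd h2 (pvOp_not_bracket hg).2
        simp only [h1, h2, hget, pvDelta, ite_false, ite_true]
        have : d + -1 = d - 1 := by ring
        rw [this]
        exact ih (s + 1) (d - 1)
      · simp only [pvDelta, h1, h2, ite_false, add_zero]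
        cases hg : operation_priorities.get? c with
        | none => simpa [hg] using ih (s + 1) d
        | some v => simpa [hg] using congrArg (List.cons (s, v + d * 9)) (ih (s + 1) d)

-- ===== VERDICT (by name: the statement is the Claim_ definition above) =====
theorem get_operation_priorities_spec : Claim_equal_get_operation_priorities := by
  intro expr _
  unfold Spec_get_operation_priorities get_operation_priorities get_operation_priorities_alt
  rw [pvLemA expr.toList 0 0 PySem.Dict.empty (by simp [PySem.Dict.keys_empty])
        (by simp [PySem.Dict.keys_empty])]
  simp only [PySem.Dict.items]
  rw [pvDepths_foldl (expr.toList.map pvDelta) 0 []]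
  rw [List.nil_append, pvLemB expr.toList 0 0]
  simp [PySem.Dict.empty]
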